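-- pv_equiv track=rewrite | github.com/ArcHound/advent_of_code | aoc/year2022/day9.py | render_rope
-- ===== SOURCE A (Python) =====
-- def render_rope(rope, dims=(-15, 20, -5, 12)):
--     strs = list()
--     for j in range(dims[2], dims[3]):
--         line = ""
--         for i in range(dims[0], dims[1]):
--             c = "."
--             if (i, j) == (0, 0):
--                 c = "s"
--             if (i, j) in rope:
--                 c = str(rope.index((i, j)))
--             line += c
--         strs.append(line)
--     strs.reverse()
--     return "\n".join(strs)
-- ===== SOURCE B (Python) =====
-- def render_rope(rope, dims=(-15, 20, -5, 12)):
--     # sort-then-scan: group first-occurrence labels by row, then build each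
--     # line from runs of dots between the sorted marked columns (no per-cell work)
--     by_row = {}
--     for idx, (x, y) in enumerate(rope):
--         if dims[0] <= x < dims[1] and dims[2] <= y < dims[3]:
--             by_row.setdefault(y, {}).setdefault(x, str(idx))
--     if dims[0] <= 0 < dims[1] and dims[2] <= 0 < dims[3]:
--         by_row.setdefault(0, {}).setdefault(0, "s")
--     lines = []
--     for j in range(dims[3] - 1, dims[2] - 1, -1):
--         row = by_row.get(j, {})
--         pieces = []
--         prev = dims[0]
--         for x in sorted(row):
--             pieces.append("." * (x - prev))
--             pieces.append(row[x])
--             prev = x + 1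
--         pieces.append("." * (dims[1] - prev))
--         lines.append("".join(pieces))
--     return "\n".join(lines)
-- ===== Notes on version B (the rewrite author's own statement) =====
-- stated objective: alternative
-- what changed: Instead of scanning every grid cell and querying rope membership/index per cell, B groups the knots by row into first-occurrence label maps and builds each line as runs of dots between the sorted marked columns (sort-then-scan over knots, no per-cell work).
import Mathlib
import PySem

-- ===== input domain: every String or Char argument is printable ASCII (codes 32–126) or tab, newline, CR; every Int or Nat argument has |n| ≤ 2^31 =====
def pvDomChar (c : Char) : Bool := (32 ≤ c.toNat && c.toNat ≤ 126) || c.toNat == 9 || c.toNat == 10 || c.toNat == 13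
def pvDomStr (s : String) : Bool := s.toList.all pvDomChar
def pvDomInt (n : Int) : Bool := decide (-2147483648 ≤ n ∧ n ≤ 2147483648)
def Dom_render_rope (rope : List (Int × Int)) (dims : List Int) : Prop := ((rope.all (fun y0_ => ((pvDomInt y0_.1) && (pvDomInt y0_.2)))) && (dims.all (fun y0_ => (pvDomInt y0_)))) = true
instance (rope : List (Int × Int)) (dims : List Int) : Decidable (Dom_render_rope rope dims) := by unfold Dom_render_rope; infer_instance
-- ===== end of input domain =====

-- B replaces A's cell-by-cell membership/index scans by grouping the knots once into
-- per-row first-occurrence label maps and emitting each line as dot-runs between the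
-- sorted marked columns (objective: alternative).

-- ===== PORT A =====
def render_rope (rope : List (Int × Int)) (dims : List Int) : String :=
  match dims with
  | d0 :: d1 :: d2 :: d3 :: _ =>
    let strs := (PySem.List.pyRange d2 d3 1).foldl (fun strs j =>
      let line := (PySem.List.pyRange d0 d1 1).foldl (fun line i =>
        let c := ".";
        let c := if (i, j) = ((0 : Int), (0 : Int)) then "s" else c;
        -- '(i, j) in rope' then 'rope.index((i, j))': index? is some exactly on membership
        let c := match PySem.List.index? rope (i, j) with
                 | some k => PySem.Int.toStr (k : Int)
                 | none => c;
        line ++ c) ""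
      strs ++ [line]) ([] : List String)
    PySem.Str.join "\n" strs.reverse
  | _ => ""  -- unreachable under Pre_ (Python raises IndexError)

-- ===== PORT B =====
-- '"." * n' (exact: Python yields "" for n ≤ 0, toNat clamps the same way)
def pvDots (n : Int) : String := String.ofList (List.replicate n.toNat '.')

def render_rope_alt (rope : List (Int × Int)) (dims : List Int) : String :=
  -- dims[k] accesses; default 0 only where Python would raise IndexError (outside Pre_)
  let d0 := PySem.List.pyGetD dims 0 0
  let d1 := PySem.List.pyGetD dims 1 0
  let d2 := PySem.List.pyGetD dims 2 0
  let d3 := PySem.List.pyGetD dims 3 0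
  -- by_row.setdefault(y, {}).setdefault(x, str(idx)) for knots inside the window
  let byRow := (PySem.List.enumerate rope 0).foldl
    (fun (m : PySem.Dict Int (PySem.Dict Int String)) p =>
      if d0 ≤ p.2.1 ∧ p.2.1 < d1 ∧ d2 ≤ p.2.2 ∧ p.2.2 < d3 then
        let m' := m.setdefault p.2.2 PySem.Dict.empty
        m'.insert p.2.2 ((m'.getD p.2.2 PySem.Dict.empty).setdefault p.2.1 (PySem.Int.toStr p.1))
      else m)
    PySem.Dict.empty
  let byRow := if d0 ≤ 0 ∧ 0 < d1 ∧ d2 ≤ 0 ∧ 0 < d3 then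
      let m' := byRow.setdefault 0 PySem.Dict.empty
      m'.insert 0 ((m'.getD 0 PySem.Dict.empty).setdefault 0 "s")
    else byRow
  let lines := (PySem.List.pyRange (d3 - 1) (d2 - 1) (-1)).foldl (fun lines j =>
    let row := byRow.getD j PySem.Dict.empty
    -- dot-run builder: pieces list plus the 'prev' cursor; row[x] is 'getD x ""'
    -- (the default is unreachable: x ranges over row's own keys)
    let st := (PySem.List.sorted row.keys (fun x => x) false).foldl
      (fun (st : List String × Int) x => (st.1 ++ [pvDots (x - st.2), row.getD x ""], x + 1))
      (([] : List String), d0)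
    lines ++ [PySem.Str.join "" (st.1 ++ [pvDots (d1 - st.2)])]) ([] : List String)
  PySem.Str.join "\n" lines

-- ===== PRECONDITION & SPEC =====
-- Pre_ excludes exactly the inputs where Python A raises IndexError: dims with fewer than 4 entries.
def Pre_render_rope (rope : List (Int × Int)) (dims : List Int) : Prop := 4 ≤ dims.length
instance (rope : List (Int × Int)) (dims : List Int) : Decidable (Pre_render_rope rope dims) := by unfold Pre_render_rope; infer_instance
def pvWitness_render_rope : (List (Int × Int)) × List Int := ([((0 : Int), (0 : Int)), ((1 : Int), (1 : Int))], [-2, 3, -1, 2])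

def Spec_render_rope (rope : List (Int × Int)) (dims : List Int) (out : String) : Prop := out = render_rope_alt rope dims
instance (rope : List (Int × Int)) (dims : List Int) (out : String) : Decidable (Spec_render_rope rope dims out) := by unfold Spec_render_rope; infer_instance

-- ===== CLAIM (what is proved, stated in full; the proofs are below) =====
def Claim_equal_render_rope : Prop := ∀ (rope : List (Int × Int)) (dims : List Int), Dom_render_rope rope dims → Pre_render_rope rope dims → Spec_render_rope rope dims (render_rope rope dims)

-- ===== LEMMAS AND PROOFS =====

-- proof-side helpers: the cell A writes, and the optional label B stores
def pvCell (rope : List (Int × Int)) (i j : Int) : String :=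
  match PySem.List.index? rope (i, j) with
  | some k => PySem.Int.toStr (k : Int)
  | none => if (i, j) = ((0 : Int), (0 : Int)) then "s" else "."

def pvMark (rope : List (Int × Int)) (x j : Int) : Option String :=
  match PySem.List.index? rope (x, j) with
  | some k => some (PySem.Int.toStr (k : Int))
  | none => if (x, j) = ((0 : Int), (0 : Int)) then some "s" else none

theorem pvCell_eq_mark (rope : List (Int × Int)) (i j : Int) :
    pvCell rope i j = (pvMark rope i j).getD "." := by
  unfold pvCell pvMark
  cases PySem.List.index? rope (i, j) with
  | none => by_cases h : (i, j) = ((0 : Int), (0 : Int)) <;> simp [h]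
  | some k => rfl

theorem pv_intercalate_nil (ps : List (List Char)) :
    List.intercalate ([] : List Char) ps = ps.flatten := by
  induction ps with
  | nil => simp [List.intercalate]
  | cons p ps ih => cases ps <;> simp_all [List.intercalate, List.intersperse]

theorem pv_join_empty_toList (ps : List String) :
    (PySem.Str.join "" ps).toList = ps.flatMap String.toList := by
  simp [PySem.Str.join, PySem.Chars.join, pv_intercalate_nil, List.flatMap_def]

theorem pv_flatten_rep (n : Nat) :
    (List.replicate n (['.'] : List Char)).flatten = List.replicate n '.' := by
  induction n with
  | zero => rfl
  | succ n ih => simp [List.replicate_succ, ih]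

theorem pv_str_foldl_toList (l : List Int) (F : Int → String) (s : String) :
    (l.foldl (fun a i => a ++ F i) s).toList = s.toList ++ l.flatMap (fun i => (F i).toList) := by
  induction l generalizing s with
  | nil => simp
  | cons i l ih => simp [ih, String.toList_append]

theorem pv_pieces_shift (row : PySem.Dict Int String) (ks : List Int) (acc : List String) (p : Int) :
    ks.foldl (fun (st : List String × Int) x => (st.1 ++ [pvDots (x - st.2), row.getD x ""], x + 1)) (acc, p)
      = (acc ++ (ks.foldl (fun (st : List String × Int) x => (st.1 ++ [pvDots (x - st.2), row.getD x ""], x + 1)) (([] : List String), p)).1,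
         (ks.foldl (fun (st : List String × Int) x => (st.1 ++ [pvDots (x - st.2), row.getD x ""], x + 1)) (([] : List String), p)).2) := by
  induction ks generalizing acc p with
  | nil => simp
  | cons x ks ih =>
    rw [List.foldl_cons, List.foldl_cons, ih, ih (acc := [] ++ [pvDots (x - p), row.getD x ""])]
    simp

theorem pv_dotrun (row : PySem.Dict Int String) (lo hi : Int)
    (h : ∀ i, lo ≤ i → i < hi → row.get? i = none) :
    (PySem.List.pyRange lo hi 1).flatMap (fun i => ((row.get? i).getD ".").toList)
      = (pvDots (hi - lo)).toList := by
  have hc : ∀ i ∈ PySem.List.pyRange lo hi 1, ((row.get? i).getD ".").toList = ['.'] := by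
    intro i hi'
    rw [PySem.List.mem_pyRange_one] at hi'
    rw [h i hi'.1 hi'.2]
    rfl
  rw [List.flatMap_def, List.map_congr_left hc, List.map_const', pv_flatten_rep,
    PySem.List.length_pyRange_one]
  simp [pvDots]

theorem pv_gapfill (row : PySem.Dict Int String) (ks : List Int) :
    ∀ (lo hi : Int),
    ks.Pairwise (· < ·) →
    (∀ x ∈ ks, lo ≤ x ∧ x < hi) →
    (∀ x, lo ≤ x → x < hi → x ∉ ks → row.get? x = none) →
    (∀ x ∈ ks, row.get? x ≠ none) →
    ((ks.foldl (fun (st : List String × Int) x => (st.1 ++ [pvDots (x - st.2), row.getD x ""], x + 1)) (([] : List String), lo)).1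
        ++ [pvDots (hi - (ks.foldl (fun (st : List String × Int) x => (st.1 ++ [pvDots (x - st.2), row.getD x ""], x + 1)) (([] : List String), lo)).2)]).flatMap String.toList
      = (PySem.List.pyRange lo hi 1).flatMap (fun i => ((row.get? i).getD ".").toList) := by
  induction ks with
  | nil =>
    intro lo hi _ _ hnone _
    rw [pv_dotrun row lo hi (fun i h1 h2 => hnone i h1 h2 (by simp))]
    simp
  | cons x ks ih =>
    intro lo hi hlt hbd hnone hsome
    obtain ⟨hxlo, hxhi⟩ := hbd x (List.mem_cons_self)
    have hgt : ∀ y ∈ ks, x < y := (List.pairwise_cons.mp hlt).1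
    rw [List.foldl_cons, pv_pieces_shift]
    have hIH := ih (x + 1) hi (List.pairwise_cons.mp hlt).2
      (fun y hy => ⟨by have := hgt y hy; omega, (hbd y (List.mem_cons_of_mem x hy)).2⟩)
      (fun y h1 h2 hy => hnone y (by omega) h2 (by
        intro hmem
        rcases List.mem_cons.mp hmem with h | h
        · omega
        · exact hy h))
      (fun y hy => hsome y (List.mem_cons_of_mem x hy))
    rw [PySem.List.pyRange_one_append lo x hi (by omega) (by omega),
      PySem.List.pyRange_one_append x (x + 1) hi (by omega) (by omega),
      PySem.List.pyRange_one_singleton]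
    simp only [List.flatMap_append, List.append_assoc, List.flatMap_cons, List.flatMap_nil,
      List.append_nil]
    rw [← hIH, pv_dotrun row lo x (fun i h1 h2 => hnone i h1 (by omega) (by
      intro hmem
      rcases List.mem_cons.mp hmem with h | h
      · omega
      · exact absurd (hgt i h) (by omega)))]
    obtain ⟨v, hv⟩ := Option.ne_none_iff_exists'.mp (hsome x List.mem_cons_self)
    rw [PySem.Dict.getD_eq_get?_getD, hv]
    simp only [List.flatMap_cons, List.flatMap_append, Option.getD_some]
    simp

theorem pv_shift_map (l : List (Int × Int)) (v : Int × Int) (s : Int) :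
    (PySem.List.index? l v).map (fun (k : Nat) => PySem.Int.toStr ((s + 1) + (k : Int)))
      = (Option.map (fun k => k + 1) (PySem.List.index? l v)).map (fun (k : Nat) => PySem.Int.toStr (s + (k : Int))) := by
  cases PySem.List.index? l v with
  | none => rfl
  | some k => simp only [Option.map_some]; congr 2; push_cast; ring

theorem pv_enumFold_get? (d0 d1 d2 d3 : Int) (l : List (Int × Int)) :
    ∀ (s : Int) (m : PySem.Dict Int (PySem.Dict Int String)) (x j : Int),
    ((((PySem.List.enumerate l s).foldl
        (fun (m : PySem.Dict Int (PySem.Dict Int String)) p =>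
          if d0 ≤ p.2.1 ∧ p.2.1 < d1 ∧ d2 ≤ p.2.2 ∧ p.2.2 < d3 then
            let m' := m.setdefault p.2.2 PySem.Dict.empty
            m'.insert p.2.2 ((m'.getD p.2.2 PySem.Dict.empty).setdefault p.2.1 (PySem.Int.toStr p.1))
          else m) m).getD j PySem.Dict.empty).get? x)
      = (((m.getD j PySem.Dict.empty).get? x).or
          (if d0 ≤ x ∧ x < d1 ∧ d2 ≤ j ∧ j < d3 then
            (PySem.List.index? l (x, j)).map (fun (k : Nat) => PySem.Int.toStr (s + (k : Int)))
          else none)) := by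
  induction l with
  | nil =>
    intro s m x j
    simp [PySem.List.enumerate_nil, PySem.List.index?_eq_idxOf?, List.idxOf?]
  | cons a l ih =>
    obtain ⟨a1, a2⟩ := a
    intro s m x j
    rw [PySem.List.enumerate_cons, List.foldl_cons, ih]
    simp only [PySem.Dict.getD_setdefault_self]
    by_cases hwa : d0 ≤ a1 ∧ a1 < d1 ∧ d2 ≤ a2 ∧ a2 < d3
    · rw [if_pos hwa]
      by_cases hj : j = a2
      · subst hj
        rw [PySem.Dict.getD_insert, if_pos rfl]
        by_cases hx : x = a1
        · subst hx
          rw [PySem.Dict.get?_setdefault_self]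
          cases hg : (m.getD j PySem.Dict.empty).get? x with
          | some v => simp
          | none =>
            simp only [Option.getD_none, Option.some_or, Option.none_or]
            rw [if_pos hwa, PySem.List.index?_cons_self]
            simp
        · rw [PySem.Dict.get?_setdefault_of_ne _ _ hx]
          cases hg : (m.getD j PySem.Dict.empty).get? x with
          | some v => simp
          | none =>
            simp only [Option.none_or]
            by_cases hw : d0 ≤ x ∧ x < d1 ∧ d2 ≤ j ∧ j < d3
            · rw [if_pos hw, if_pos hw,
                PySem.List.index?_cons_of_ne l (by intro h; exact hx (congrArg Prod.fst h).symm),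
                pv_shift_map]
            · rw [if_neg hw, if_neg hw]
      · rw [PySem.Dict.getD_insert, if_neg hj, PySem.Dict.getD_eq_get?_getD,
          PySem.Dict.get?_setdefault_of_ne _ _ hj, ← PySem.Dict.getD_eq_get?_getD]
        cases hg : (m.getD j PySem.Dict.empty).get? x with
        | some v => simp
        | none =>
          simp only [Option.none_or]
          by_cases hw : d0 ≤ x ∧ x < d1 ∧ d2 ≤ j ∧ j < d3
          · rw [if_pos hw, if_pos hw,
              PySem.List.index?_cons_of_ne l (by intro h; exact hj (congrArg Prod.snd h).symm),
              pv_shift_map]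
          · rw [if_neg hw, if_neg hw]
    · rw [if_neg hwa]
      cases hg : (m.getD j PySem.Dict.empty).get? x with
      | some v => simp
      | none =>
        simp only [Option.none_or]
        by_cases hw : d0 ≤ x ∧ x < d1 ∧ d2 ≤ j ∧ j < d3
        · rw [if_pos hw, if_pos hw]
          have hne : (a1, a2) ≠ (x, j) := by
            intro h
            exact hwa (by cases h; exact hw)
          rw [PySem.List.index?_cons_of_ne l hne, pv_shift_map]
        · rw [if_neg hw, if_neg hw]

theorem pvMark_of_ne (rope : List (Int × Int)) (x j : Int) (h : ¬(x = 0 ∧ j = 0)) :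
    pvMark rope x j = (PySem.List.index? rope (x, j)).map (fun (k : Nat) => PySem.Int.toStr (k : Int)) := by
  unfold pvMark
  cases PySem.List.index? rope (x, j) with
  | some k => rfl
  | none =>
    simp only [Option.map_none]
    rw [if_neg]
    intro hxy
    exact h ⟨congrArg Prod.fst hxy, congrArg Prod.snd hxy⟩

theorem pvMark_zero (rope : List (Int × Int)) :
    pvMark rope 0 0 = some (((PySem.List.index? rope (0, 0)).map (fun (k : Nat) => PySem.Int.toStr (k : Int))).getD "s") := by
  unfold pvMark
  cases PySem.List.index? rope (0, 0) <;> rfl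

theorem pv_setdefault_nodup (d : PySem.Dict Int String) (k : Int) (v : String) (h : d.keys.Nodup) :
    ((d.setdefault k v).keys).Nodup := by
  rw [PySem.Dict.keys_setdefault]
  split_ifs with hc
  · exact h
  · have hk : k ∉ d.keys := by
      rw [PySem.Dict.contains_eq_decide_mem_keys] at hc
      simpa using hc
    simp [List.nodup_append, h]
    exact fun a ha hak => hk (hak ▸ ha)

theorem pv_enumFold_nodup (d0 d1 d2 d3 : Int) (l : List (Int × Int)) :
    ∀ (s : Int) (m : PySem.Dict Int (PySem.Dict Int String)),
    (∀ j, ((m.getD j PySem.Dict.empty).keys).Nodup) →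
    ∀ j, ((((PySem.List.enumerate l s).foldl
        (fun (m : PySem.Dict Int (PySem.Dict Int String)) p =>
          if d0 ≤ p.2.1 ∧ p.2.1 < d1 ∧ d2 ≤ p.2.2 ∧ p.2.2 < d3 then
            let m' := m.setdefault p.2.2 PySem.Dict.empty
            m'.insert p.2.2 ((m'.getD p.2.2 PySem.Dict.empty).setdefault p.2.1 (PySem.Int.toStr p.1))
          else m) m).getD j PySem.Dict.empty).keys).Nodup := by
  induction l with
  | nil =>
    intro s m hm j
    rw [PySem.List.enumerate_nil, List.foldl_nil]
    exact hm j
  | cons a l ih =>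
    obtain ⟨a1, a2⟩ := a
    intro s m hm j
    rw [PySem.List.enumerate_cons, List.foldl_cons]
    refine ih (s + 1) _ ?_ j
    intro j'
    simp only [PySem.Dict.getD_setdefault_self]
    by_cases hwa : d0 ≤ a1 ∧ a1 < d1 ∧ d2 ≤ a2 ∧ a2 < d3
    · rw [if_pos hwa]
      by_cases hj : j' = a2
      · subst hj
        rw [PySem.Dict.getD_insert, if_pos rfl]
        exact pv_setdefault_nodup _ _ _ (hm j')
      · rw [PySem.Dict.getD_insert, if_neg hj, PySem.Dict.getD_eq_get?_getD,
          PySem.Dict.get?_setdefault_of_ne _ _ hj, ← PySem.Dict.getD_eq_get?_getD]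
        exact hm j'
    · rw [if_neg hwa]
      exact hm j'

theorem pv_byRow_get? (rope : List (Int × Int)) (d0 d1 d2 d3 : Int) (x j : Int) :
    (((if d0 ≤ 0 ∧ 0 < d1 ∧ d2 ≤ 0 ∧ 0 < d3 then
        let m' := ((PySem.List.enumerate rope 0).foldl
          (fun (m : PySem.Dict Int (PySem.Dict Int String)) p =>
            if d0 ≤ p.2.1 ∧ p.2.1 < d1 ∧ d2 ≤ p.2.2 ∧ p.2.2 < d3 then
              let m' := m.setdefault p.2.2 PySem.Dict.empty
              m'.insert p.2.2 ((m'.getD p.2.2 PySem.Dict.empty).setdefault p.2.1 (PySem.Int.toStr p.1))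
            else m) PySem.Dict.empty).setdefault 0 PySem.Dict.empty
        m'.insert 0 ((m'.getD 0 PySem.Dict.empty).setdefault 0 "s")
      else ((PySem.List.enumerate rope 0).foldl
          (fun (m : PySem.Dict Int (PySem.Dict Int String)) p =>
            if d0 ≤ p.2.1 ∧ p.2.1 < d1 ∧ d2 ≤ p.2.2 ∧ p.2.2 < d3 then
              let m' := m.setdefault p.2.2 PySem.Dict.empty
              m'.insert p.2.2 ((m'.getD p.2.2 PySem.Dict.empty).setdefault p.2.1 (PySem.Int.toStr p.1))
            else m) PySem.Dict.empty)).getD j PySem.Dict.empty).get? x)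
    = if d0 ≤ x ∧ x < d1 ∧ d2 ≤ j ∧ j < d3 then pvMark rope x j else none := by
  have hbase : ∀ (x j : Int), ((((PySem.List.enumerate rope 0).foldl
      (fun (m : PySem.Dict Int (PySem.Dict Int String)) p =>
        if d0 ≤ p.2.1 ∧ p.2.1 < d1 ∧ d2 ≤ p.2.2 ∧ p.2.2 < d3 then
          let m' := m.setdefault p.2.2 PySem.Dict.empty
          m'.insert p.2.2 ((m'.getD p.2.2 PySem.Dict.empty).setdefault p.2.1 (PySem.Int.toStr p.1))
        else m) PySem.Dict.empty).getD j PySem.Dict.empty).get? x)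
      = if d0 ≤ x ∧ x < d1 ∧ d2 ≤ j ∧ j < d3 then
          (PySem.List.index? rope (x, j)).map (fun (k : Nat) => PySem.Int.toStr (k : Int))
        else none := by
    intro x j
    rw [pv_enumFold_get?]
    simp [PySem.Dict.getD_empty, PySem.Dict.get?_empty]
  split_ifs with hw0 hw hw2
  · by_cases hj : j = 0
    · subst hj
      rw [PySem.Dict.getD_insert, if_pos rfl, PySem.Dict.getD_setdefault_self]
      by_cases hx : x = 0
      · subst hx
        rw [PySem.Dict.get?_setdefault_self, hbase, if_pos hw0, pvMark_zero]
      · rw [PySem.Dict.get?_setdefault_of_ne _ _ hx, hbase, if_pos hw,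
          pvMark_of_ne rope x 0 (fun h => hx h.1)]
    · rw [PySem.Dict.getD_insert, if_neg hj, PySem.Dict.getD_eq_get?_getD,
        PySem.Dict.get?_setdefault_of_ne _ _ hj, ← PySem.Dict.getD_eq_get?_getD, hbase, if_pos hw,
        pvMark_of_ne rope x j (fun h => hj h.2)]
  · by_cases hj : j = 0
    · subst hj
      rw [PySem.Dict.getD_insert, if_pos rfl, PySem.Dict.getD_setdefault_self]
      by_cases hx : x = 0
      · subst hx
        exact absurd hw0 hw
      · rw [PySem.Dict.get?_setdefault_of_ne _ _ hx, hbase, if_neg hw]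
    · rw [PySem.Dict.getD_insert, if_neg hj, PySem.Dict.getD_eq_get?_getD,
        PySem.Dict.get?_setdefault_of_ne _ _ hj, ← PySem.Dict.getD_eq_get?_getD, hbase, if_neg hw]
  · rw [hbase, if_pos hw2]
    have hne : ¬(x = 0 ∧ j = 0) := by
      intro h
      obtain ⟨h1, h2⟩ := h
      subst h1; subst h2
      exact hw0 hw2
    rw [pvMark_of_ne rope x j hne]
  · rw [hbase, if_neg hw2]

theorem pv_byRow_nodup (rope : List (Int × Int)) (d0 d1 d2 d3 : Int) (j : Int) :
    (((if d0 ≤ 0 ∧ 0 < d1 ∧ d2 ≤ 0 ∧ 0 < d3 then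
        let m' := ((PySem.List.enumerate rope 0).foldl
          (fun (m : PySem.Dict Int (PySem.Dict Int String)) p =>
            if d0 ≤ p.2.1 ∧ p.2.1 < d1 ∧ d2 ≤ p.2.2 ∧ p.2.2 < d3 then
              let m' := m.setdefault p.2.2 PySem.Dict.empty
              m'.insert p.2.2 ((m'.getD p.2.2 PySem.Dict.empty).setdefault p.2.1 (PySem.Int.toStr p.1))
            else m) PySem.Dict.empty).setdefault 0 PySem.Dict.empty
        m'.insert 0 ((m'.getD 0 PySem.Dict.empty).setdefault 0 "s")
      else ((PySem.List.enumerate rope 0).foldl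
          (fun (m : PySem.Dict Int (PySem.Dict Int String)) p =>
            if d0 ≤ p.2.1 ∧ p.2.1 < d1 ∧ d2 ≤ p.2.2 ∧ p.2.2 < d3 then
              let m' := m.setdefault p.2.2 PySem.Dict.empty
              m'.insert p.2.2 ((m'.getD p.2.2 PySem.Dict.empty).setdefault p.2.1 (PySem.Int.toStr p.1))
            else m) PySem.Dict.empty)).getD j PySem.Dict.empty).keys).Nodup := by
  have hM := pv_enumFold_nodup d0 d1 d2 d3 rope 0 PySem.Dict.empty
    (by intro j'; simp [PySem.Dict.getD_empty])
  simp only [PySem.Dict.getD_setdefault_self] at hM ⊢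
  split_ifs with hw0
  · by_cases hj : j = 0
    · subst hj
      rw [PySem.Dict.getD_insert, if_pos rfl]
      exact pv_setdefault_nodup _ _ _ (hM 0)
    · rw [PySem.Dict.getD_insert, if_neg hj, PySem.Dict.getD_eq_get?_getD,
        PySem.Dict.get?_setdefault_of_ne _ _ hj, ← PySem.Dict.getD_eq_get?_getD]
      exact hM j
  · exact hM j

theorem pv_lineA (rope : List (Int × Int)) (j d0 d1 : Int) :
    (PySem.List.pyRange d0 d1 1).foldl (fun line i =>
      let c := ".";
      let c := if (i, j) = ((0 : Int), (0 : Int)) then "s" else c;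
      let c := match PySem.List.index? rope (i, j) with
               | some k => PySem.Int.toStr (k : Int)
               | none => c;
      line ++ c) ""
    = (PySem.List.pyRange d0 d1 1).foldl (fun line i => line ++ pvCell rope i j) "" := by
  apply PySem.List.foldl_congr_mem
  intro acc i _
  rfl

theorem pv_lineB (row : PySem.Dict Int String) (rope : List (Int × Int)) (d0 d1 d2 d3 j : Int)
    (hnd : row.keys.Nodup)
    (hget : ∀ x, row.get? x = if d0 ≤ x ∧ x < d1 ∧ d2 ≤ j ∧ j < d3 then pvMark rope x j else none)
    (hj : d2 ≤ j ∧ j < d3) :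
    (PySem.List.pyRange d0 d1 1).foldl (fun line i => line ++ pvCell rope i j) ""
      = PySem.Str.join "" (((PySem.List.sorted row.keys (fun x => x) false).foldl
          (fun (st : List String × Int) x => (st.1 ++ [pvDots (x - st.2), row.getD x ""], x + 1))
          (([] : List String), d0)).1
        ++ [pvDots (d1 - ((PySem.List.sorted row.keys (fun x => x) false).foldl
          (fun (st : List String × Int) x => (st.1 ++ [pvDots (x - st.2), row.getD x ""], x + 1))
          (([] : List String), d0)).2)]) := by
  apply String.toList_inj.mp
  rw [pv_str_foldl_toList, pv_join_empty_toList]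
  have hks_mem : ∀ x : Int, x ∈ PySem.List.sorted row.keys (fun x => x) false ↔ x ∈ row.keys :=
    fun x => PySem.List.mem_sorted row.keys (fun x => x) false x
  rw [pv_gapfill row (PySem.List.sorted row.keys (fun x => x) false) d0 d1
    (by
      have hle := PySem.List.sorted_pairwise row.keys (fun x => x)
      have hnds : (PySem.List.sorted row.keys (fun x => x) false).Nodup :=
        ((PySem.List.sorted_perm row.keys (fun x => x) false).nodup_iff).mpr hnd
      exact (hle.and hnds).imp (fun h => lt_of_le_of_ne h.1 h.2))
    (by
      intro x hx
      have hne : row.get? x ≠ none := by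
        intro h
        rw [PySem.Dict.get?_eq_none_iff_not_mem_keys] at h
        exact h ((hks_mem x).mp hx)
      rw [hget x] at hne
      by_cases hw : d0 ≤ x ∧ x < d1 ∧ d2 ≤ j ∧ j < d3
      · exact ⟨hw.1, hw.2.1⟩
      · rw [if_neg hw] at hne
        exact absurd rfl hne)
    (by
      intro x _ _ hx
      rw [PySem.Dict.get?_eq_none_iff_not_mem_keys]
      intro hmem
      exact hx ((hks_mem x).mpr hmem))
    (by
      intro x hx h
      rw [PySem.Dict.get?_eq_none_iff_not_mem_keys] at h
      exact h ((hks_mem x).mp hx))]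
  have hcells : ∀ i ∈ PySem.List.pyRange d0 d1 1,
      (pvCell rope i j).toList = ((row.get? i).getD ".").toList := by
    intro i hi
    rw [PySem.List.mem_pyRange_one] at hi
    rw [pvCell_eq_mark, hget i, if_pos ⟨hi.1, hi.2, hj.1, hj.2⟩]
  rw [List.flatMap_def, List.flatMap_def, List.map_congr_left hcells]
  simp

theorem render_rope_spec_aux (rope : List (Int × Int)) (d0 d1 d2 d3 : Int) (rest : List Int) :
    render_rope rope (d0 :: d1 :: d2 :: d3 :: rest) = render_rope_alt rope (d0 :: d1 :: d2 :: d3 :: rest) := by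
  unfold render_rope_alt
  simp only [PySem.List.pyGetD_ofNat', List.getD, List.getElem?_cons_succ, List.getElem?_cons_zero,
    Option.getD_some]
  show PySem.Str.join "\n" _ = PySem.Str.join "\n" _
  congr 1
  rw [PySem.List.foldl_append_singleton_eq_map, PySem.List.foldl_append_singleton_eq_map]
  have hrange : PySem.List.pyRange (d3 - 1) (d2 - 1) (-1) = (PySem.List.pyRange d2 d3 1).reverse := by
    rw [PySem.List.pyRange_neg_one_eq_reverse]
    norm_num
  rw [hrange, List.map_reverse, List.nil_append, List.nil_append, List.reverse_inj]
  apply List.map_congr_left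
  intro j hj
  rw [PySem.List.mem_pyRange_one] at hj
  rw [pv_lineA]
  exact pv_lineB _ rope d0 d1 d2 d3 j (pv_byRow_nodup rope d0 d1 d2 d3 j)
    (fun x => pv_byRow_get? rope d0 d1 d2 d3 x j) hj

-- ===== VERDICT (by name: the statement is the Claim_ definition above) =====
theorem render_rope_spec : Claim_equal_render_rope := by
  intro rope dims _ hpre
  unfold Spec_render_rope
  match dims, hpre with
  | d0 :: d1 :: d2 :: d3 :: rest, _ => exact render_rope_spec_aux rope d0 d1 d2 d3 rest
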